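-- pv_equiv track=rewrite | github.com/evanmoore0/Brown | hw2/maxword.py | max_word
-- ===== SOURCE A (Python) =====
-- class InvalidInputException(Exception):
--     def __init__(self,value):
--         self.value = value
--     def __str__(self):
--         return repr(self.value)
--
-- def max_word(s):
--     """max_word: string -> int
--     Purpose: Find the number of occurences of the most common word in a string
--     Consumes: a string
--     Produces: an int, the number of occurences of the most common word in the string
--     Example: max_word("hello world") -> 1
--              max_word("the quick brown fox jumped over the lazy dog") -> 2
--     """
--     # error checking on input string -- is it valid?
--     if s is None or s == "":
--         raise InvalidInputException("string is invalid")
--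
--     if(s == " "):
--         return 0
--
--     a = s.split(" ")
--     dict = {}
--
--     solution = 0
--
--     for word in a:
--         #dict[word] = a.count(word)
--         if word in dict:
--             dict[word] += 1
--         else:
--             dict[word] = 1
--
--     for key in dict:
--         if(solution < dict[key]):
--             solution = dict[key]
--     return solution
-- ===== SOURCE B (Python) =====
-- class InvalidInputException(Exception):
--     def __init__(self, value):
--         self.value = value
--     def __str__(self):
--         return repr(self.value)
--
-- def max_word(s):
--     # sort the words, then one linear scan tracking the current run length
--     if s is None or s == "":
--         raise InvalidInputException("string is invalid")
--     if s == " ":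
--         return 0
--     best = 0
--     run = 0
--     prev = None
--     for w in sorted(s.split(" ")):
--         run = run + 1 if w == prev else 1
--         if run > best:
--             best = run
--         prev = w
--     return best
-- ===== Notes on version B (the rewrite author's own statement) =====
-- stated objective: alternative
-- what changed: B replaces A's dict-counting loop plus a max-over-values loop by sorting the word list and one linear run-length scan that tracks the current run and the best run.
import Mathlib
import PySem

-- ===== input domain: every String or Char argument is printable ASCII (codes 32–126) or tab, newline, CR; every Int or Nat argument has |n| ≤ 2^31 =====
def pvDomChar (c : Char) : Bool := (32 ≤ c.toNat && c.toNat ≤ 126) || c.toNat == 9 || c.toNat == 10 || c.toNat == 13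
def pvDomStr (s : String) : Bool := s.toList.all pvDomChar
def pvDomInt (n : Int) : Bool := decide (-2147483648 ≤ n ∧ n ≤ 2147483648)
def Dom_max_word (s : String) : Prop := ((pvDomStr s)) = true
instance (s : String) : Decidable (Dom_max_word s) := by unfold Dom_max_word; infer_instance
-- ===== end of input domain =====

-- B sorts the word list and takes one run-length scan instead of A's dict counting (alternative algorithm, same result).

-- ===== PORT A =====
def max_word (s : String) : Int :=
  if s = "" then 0  -- Python raises InvalidInputException here; excluded by Pre_max_word
  else if s = " " then 0
  else
    match PySem.Str.split? s " " with
    | none => 0  -- unreachable: the separator " " is nonempty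
    | some a =>
      let d := a.foldl
        (fun (d : PySem.Dict String Int) w =>
          if d.contains w then d.insert w ((d.get? w).getD 0 + 1) else d.insert w 1)
        PySem.Dict.empty
      d.keys.foldl (fun sol k => if sol < (d.get? k).getD 0 then (d.get? k).getD 0 else sol) 0

-- ===== PORT B =====
-- one step of B's run-length scan: state = (best, run, previous word)
def bstep (st : Int × Int × Option String) (w : String) : Int × Int × Option String :=
  let run := if some w = st.2.2 then st.2.1 + 1 else 1
  let best := if run > st.1 then run else st.1
  (best, run, some w)

def max_word_alt (s : String) : Int :=
  if s = "" then 0  -- Python raises InvalidInputException here; excluded by Pre_max_word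
  else if s = " " then 0
  else
    match PySem.Str.split? s " " with
    | none => 0  -- unreachable: the separator " " is nonempty
    | some a =>
      ((PySem.List.sorted a (fun w => w) false).foldl bstep (0, 0, none)).1

-- ===== PRECONDITION & SPEC =====
-- Pre_ excludes only s = "", where the Python A raises InvalidInputException (B raises it too).
def Pre_max_word (s : String) : Prop := s ≠ ""
instance (s : String) : Decidable (Pre_max_word s) := by unfold Pre_max_word; infer_instance
def pvWitness_max_word : String := "a b a"

def Spec_max_word (s : String) (out : Int) : Prop := out = max_word_alt s
instance (s : String) (out : Int) : Decidable (Spec_max_word s out) := by unfold Spec_max_word; infer_instance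

-- ===== CLAIM (what is proved, stated in full; the proofs are below) =====
def Claim_equal_max_word : Prop := ∀ (s : String), Dom_max_word s → Pre_max_word s → Spec_max_word s (max_word s)

-- ===== LEMMAS AND PROOFS =====

-- the maximum of a list of Ints, floored at 0 (the shape both final folds take)
def fmax (l : List Int) : Int := l.foldl max 0

-- the maximal multiplicity in a word list
def M (l : List String) : Int := fmax (l.map (fun k => (l.count k : Int)))

theorem foldl_max_init (l : List Int) (a : Int) : ∀ b, l.foldl max (max a b) = max a (l.foldl max b) := by
  induction l with
  | nil => intro b; rfl
  | cons x t ih => intro b; simp only [List.foldl_cons, max_assoc]; exact ih (max b x)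

theorem fmax_cons (a : Int) (l : List Int) : fmax (a :: l) = max a (fmax l) := by
  simp only [fmax, List.foldl_cons]
  rw [show max (0 : Int) a = max a 0 from max_comm 0 a, foldl_max_init l a 0]

theorem fmax_nonneg (l : List Int) : 0 ≤ fmax l := (PySem.List.le_foldl_max l 0).1

theorem le_fmax (l : List Int) {x : Int} (hx : x ∈ l) : x ≤ fmax l :=
  (PySem.List.le_foldl_max l 0).2 x hx

theorem foldl_max_le (l : List Int) : ∀ a c : Int, a ≤ c → (∀ x ∈ l, x ≤ c) → l.foldl max a ≤ c := by
  induction l with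
  | nil => intro a c hac _; exact hac
  | cons x t ih =>
      intro a c hac h
      exact ih (max a x) c (max_le hac (h x (List.mem_cons_self ..)))
        (fun y hy => h y (List.mem_cons_of_mem _ hy))

theorem fmax_le (l : List Int) (c : Int) (hc : 0 ≤ c) (h : ∀ x ∈ l, x ≤ c) : fmax l ≤ c :=
  foldl_max_le l 0 c hc h

-- fmax only depends on which values occur (above 0)
theorem fmax_eq_of_mem (l l' : List Int) (h1 : ∀ x ∈ l, x ∈ l' ∨ x ≤ 0) (h2 : ∀ x ∈ l', x ∈ l ∨ x ≤ 0) :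
    fmax l = fmax l' := by
  apply le_antisymm
  · exact fmax_le l _ (fmax_nonneg l') (fun x hx => (h1 x hx).elim (le_fmax l') (fun h => h.trans (fmax_nonneg l')))
  · exact fmax_le l' _ (fmax_nonneg l) (fun x hx => (h2 x hx).elim (le_fmax l) (fun h => h.trans (fmax_nonneg l)))

theorem M_cons (w : String) (t : List String) :
    M (w :: t) = max ((t.count w : Int) + 1) (M (t.filter (fun y => y ≠ w))) := by
  rw [show max ((t.count w : Int) + 1) (M (t.filter (fun y => y ≠ w)))
      = fmax (((t.count w : Int) + 1) :: (t.filter (fun y => y ≠ w)).map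
          (fun k => ((t.filter (fun y => y ≠ w)).count k : Int)))
    from (fmax_cons _ _).symm]
  apply fmax_eq_of_mem
  · intro x hx
    obtain ⟨k, hk, rfl⟩ := List.mem_map.1 hx
    left
    rcases List.mem_cons.1 hk with rfl | hkt
    · simp [List.count_cons_self]
    · by_cases hkw : k = w
      · subst hkw; simp [List.count_cons_self]
      · right
        refine List.mem_map.2 ⟨k, List.mem_filter.2 ⟨hkt, by simp [hkw]⟩, ?_⟩
        rw [List.count_filter (by simp [hkw])]
        simp [List.count_cons]
        exact fun h => hkw h.symm
  · intro x hx
    left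
    rcases List.mem_cons.1 hx with rfl | hx'
    · exact List.mem_map.2 ⟨w, List.mem_cons_self .., by simp [List.count_cons_self]⟩
    · obtain ⟨k, hk, rfl⟩ := List.mem_map.1 hx'
      have hkt := List.mem_filter.1 hk
      have hkw : k ≠ w := by simpa using hkt.2
      refine List.mem_map.2 ⟨k, List.mem_cons_of_mem _ hkt.1, ?_⟩
      rw [List.count_filter (by simp [hkw])]
      simp [List.count_cons]
      exact fun h => hkw h.symm

theorem M_nonneg (l : List String) : 0 ≤ M l := fmax_nonneg _

theorem M_perm {l l' : List String} (h : l.Perm l') : M l = M l' := by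
  apply fmax_eq_of_mem
  · intro x hx
    obtain ⟨k, hk, rfl⟩ := List.mem_map.1 hx
    exact Or.inl (List.mem_map.2 ⟨k, h.mem_iff.1 hk, by rw [h.count_eq]⟩)
  · intro x hx
    obtain ⟨k, hk, rfl⟩ := List.mem_map.1 hx
    exact Or.inl (List.mem_map.2 ⟨k, h.mem_iff.2 hk, by rw [(h.count_eq k).symm]⟩)

-- the run-length invariant of B's scan over a sorted suffix
theorem runlen_invariant (ys : List String) : ∀ (best run : Int) (p : String),
    ys.Pairwise (fun a b => a ≤ b) → (∀ y ∈ ys, p ≤ y) → 0 ≤ run → run ≤ best →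
    (ys.foldl bstep (best, run, some p)).1
      = max best (max (run + (ys.count p : Int)) (M (ys.filter (fun y => y ≠ p)))) := by
  induction ys with
  | nil =>
      intro best run p _ _ hr hrb
      simp only [List.foldl_nil, List.count_nil, List.filter_nil]
      have : M [] = 0 := rfl
      omega
  | cons w t ih =>
      intro best run p hp hle hr hrb
      obtain ⟨hw, hpt⟩ := List.pairwise_cons.1 hp
      by_cases hwp : w = p
      · subst hwp
        have hstep : bstep (best, run, some w) w = (max best (run + 1), run + 1, some w) := by
          simp only [bstep]
          refine Prod.ext ?_ rfl
          simp only [max_def]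
          split_ifs <;> omega
        rw [List.foldl_cons, hstep,
          ih (max best (run + 1)) (run + 1) w hpt hw (by omega) (le_max_right _ _)]
        rw [List.count_cons_self, List.filter_cons_of_neg (by simp)]
        have hm := M_nonneg (t.filter (fun y => y ≠ w))
        have hc : (0 : Int) ≤ (t.count w : Int) := by positivity
        push_cast
        omega
      · have hpw : p < w := lt_of_le_of_ne (hle w (List.mem_cons_self ..)) (Ne.symm hwp)
        have hnm : p ∉ w :: t := by
          intro hmem
          rcases List.mem_cons.1 hmem with rfl | hmt
          · exact absurd rfl (ne_of_gt hpw)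
          · exact absurd rfl (ne_of_gt (lt_of_lt_of_le hpw (hw p hmt)))
        have hcnt : (w :: t).count p = 0 := List.count_eq_zero.2 hnm
        have hfil : (w :: t).filter (fun y => y ≠ p) = w :: t :=
          List.filter_eq_self.2 (fun y hy => by
            simp only [decide_eq_true_eq]
            intro h; exact hnm (h ▸ hy))
        have hstep : bstep (best, run, some p) w = (max best 1, 1, some w) := by
          simp only [bstep, if_neg (by simp [hwp] : ¬ (some w = some p))]
          refine Prod.ext ?_ rfl
          simp only [max_def]
          split_ifs <;> omega
        rw [List.foldl_cons, hstep,
          ih (max best 1) 1 w hpt hw (by omega) (le_max_right _ _), hcnt, hfil, M_cons]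
        have hm := M_nonneg (t.filter (fun y => y ≠ w))
        have hc : (0 : Int) ≤ (t.count w : Int) := by positivity
        omega

-- A's counting loop is the Counter loop
theorem counting_step_eq :
    (fun (d : PySem.Dict String Int) w =>
        if d.contains w then d.insert w ((d.get? w).getD 0 + 1) else d.insert w 1)
      = (fun (d : PySem.Dict String Int) x => d.insert x (d.getD x 0 + 1)) := by
  funext d w
  by_cases h : d.contains w = true
  · simp only [h, if_true, PySem.Dict.getD_eq_get?_getD]
  · have hf : d.contains w = false := by simpa using h
    have h0 : d.getD w 0 = 0 := PySem.Dict.getD_of_not_contains d 0 hf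
    simp [hf, h0]

-- A's value is the maximal multiplicity of the word list
theorem max_word_eq_M (a : List String) :
    (let d := a.foldl
        (fun (d : PySem.Dict String Int) w =>
          if d.contains w then d.insert w ((d.get? w).getD 0 + 1) else d.insert w 1)
        PySem.Dict.empty
     d.keys.foldl (fun sol k => if sol < (d.get? k).getD 0 then (d.get? k).getD 0 else sol) 0) = M a := by
  simp only [counting_step_eq, PySem.Dict.foldl_insert_getD_add_one_eq_counter]
  have hg : ∀ k, ((PySem.Dict.counter a).get? k).getD 0 = (a.count k : Int) := by
    intro k
    rw [← PySem.Dict.getD_eq_get?_getD, PySem.Dict.getD_counter]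
  have hfun : (fun (sol : Int) k => if sol < ((PySem.Dict.counter a).get? k).getD 0
        then ((PySem.Dict.counter a).get? k).getD 0 else sol)
      = (fun (sol : Int) k => max sol ((a.count k : Int))) := by
    funext sol k
    rw [hg k, max_def]
    split_ifs <;> omega
  have : ((PySem.Dict.counter a).keys.foldl
      (fun sol k => if sol < ((PySem.Dict.counter a).get? k).getD 0
        then ((PySem.Dict.counter a).get? k).getD 0 else sol) 0)
      = ((PySem.Dict.counter a).keys.map (fun k => (a.count k : Int))).foldl max 0 := by
    rw [hfun, List.foldl_map]
  rw [this, PySem.Dict.keys_counter]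
  apply fmax_eq_of_mem
  · intro x hx
    obtain ⟨k, hk, rfl⟩ := List.mem_map.1 hx
    exact Or.inl (List.mem_map.2 ⟨k, (PySem.Set.mem_ofList a k).1 hk, rfl⟩)
  · intro x hx
    obtain ⟨k, hk, rfl⟩ := List.mem_map.1 hx
    exact Or.inl (List.mem_map.2 ⟨k, (PySem.Set.mem_ofList a k).2 hk, rfl⟩)

-- B's value is the maximal multiplicity of a sorted word list
theorem scan_eq_M (ys : List String) (hp : ys.Pairwise (fun a b => a ≤ b)) :
    (ys.foldl bstep (0, 0, none)).1 = M ys := by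
  cases ys with
  | nil => rfl
  | cons w t =>
      obtain ⟨hw, hpt⟩ := List.pairwise_cons.1 hp
      have hstep : bstep ((0 : Int), (0 : Int), (none : Option String)) w = (1, 1, some w) := rfl
      rw [List.foldl_cons, hstep,
        runlen_invariant t 1 1 w hpt hw (by omega) (le_refl 1), M_cons]
      have hm := M_nonneg (t.filter (fun y => y ≠ w))
      have hc : (0 : Int) ≤ (t.count w : Int) := by positivity
      omega

-- ===== VERDICT (by name: the statement is the Claim_ definition above) =====
theorem max_word_spec : Claim_equal_max_word := by
  intro s _ hpre
  unfold Spec_max_word max_word max_word_alt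
  rw [if_neg hpre, if_neg hpre]
  by_cases hsp : s = " "
  · simp [hsp]
  · rw [if_neg hsp, if_neg hsp]
    cases h : PySem.Str.split? s " " with
    | none => rfl
    | some a =>
        show (let d := a.foldl _ PySem.Dict.empty
              d.keys.foldl _ 0) = ((PySem.List.sorted a (fun w => w) false).foldl bstep (0, 0, none)).1
        rw [max_word_eq_M a,
          scan_eq_M (PySem.List.sorted a (fun w => w) false) (PySem.List.sorted_pairwise a (fun w => w)),
          M_perm (PySem.List.sorted_perm a (fun w => w) false)]
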